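-- pv_equiv track=rewrite | github.com/yavor-gornalov/softuni_algorithms_with_python | algorithms_fundamentals/02_recursion_and_backtracking_exercise/04_connected_areas_in_matrix.py | explore_area
-- ===== SOURCE A (Python) =====
-- def explore_area(row, col, matrix):
--     if row < 0 or col < 0 or row >= len(matrix) or col >= len(matrix[0]):
--         return 0
--     if matrix[row][col] == "*" or matrix[row][col] == "v":
--         return 0
--
--     result = 1
--     matrix[row][col] = "v"
--     result += explore_area(row + 1, col, matrix)  # down
--     result += explore_area(row, col + 1, matrix)  # right
--     result += explore_area(row - 1, col, matrix)  # up
--     result += explore_area(row, col - 1, matrix)  # left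
--
--     return result
-- ===== SOURCE B (Python) =====
-- def explore_area(row, col, matrix):
--     if row < 0 or col < 0 or row >= len(matrix) or col >= len(matrix[0]):
--         return 0
--     if matrix[row][col] == "*" or matrix[row][col] == "v":
--         return 0
--     count = 0
--     stack = [(row, col)]
--     while stack:
--         r, c = stack.pop()
--         if r < 0 or c < 0 or r >= len(matrix) or c >= len(matrix[0]):
--             continue
--         if matrix[r][c] == "*" or matrix[r][c] == "v":
--             continue
--         matrix[r][c] = "v"
--         count += 1
--         stack.extend(((r, c - 1), (r - 1, c), (r, c + 1), (r + 1, c)))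
--     return count
-- ===== Notes on version B (the rewrite author's own statement) =====
-- stated objective: alternative
-- what changed: Replaces the recursive flood fill by an iterative depth-first search with an explicit stack (push left,up,right,down so pop() visits down first, the recursion's order), marking and counting cells as they are popped; no recursion-depth limit.
import Mathlib
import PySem

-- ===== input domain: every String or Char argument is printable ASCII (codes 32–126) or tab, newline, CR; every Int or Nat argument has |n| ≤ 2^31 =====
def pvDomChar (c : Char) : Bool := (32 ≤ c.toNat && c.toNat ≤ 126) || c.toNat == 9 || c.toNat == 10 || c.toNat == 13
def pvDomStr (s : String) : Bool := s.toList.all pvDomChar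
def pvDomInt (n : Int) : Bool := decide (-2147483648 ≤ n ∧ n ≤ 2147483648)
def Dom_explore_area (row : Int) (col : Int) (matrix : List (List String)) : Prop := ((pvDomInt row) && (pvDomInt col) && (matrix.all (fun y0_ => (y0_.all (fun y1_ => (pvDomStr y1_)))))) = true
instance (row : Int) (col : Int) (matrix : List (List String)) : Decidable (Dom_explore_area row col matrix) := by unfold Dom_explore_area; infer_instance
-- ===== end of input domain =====

-- B replaces A's recursive flood fill by an iterative explicit-stack DFS (alternative
-- decomposition, no recursion depth); both Pythons mutate `matrix` in place marking
-- visited cells "v" — the equivalence proved here is about the RETURN value only.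

-- Shared cell primitives (both Pythons use the identical guard / cell-test / mark steps).
-- len(matrix[0]) with matrix possibly empty: Python only evaluates it after
-- `row >= len(matrix)` was false; so the `.getD []` default never changes the result.
def pvWidth (matrix : List (List String)) : Nat := (matrix.headD []).length
-- matrix[r][c]; the `.getD "*"` default is reached only on ragged rows, where Python
-- raises IndexError; the blocked default keeps both ports total (they use the identical
-- expression there, so the proved equality of the ports is unaffected).
def pvCell (matrix : List (List String)) (r c : Int) : String :=
  (PySem.List.pyGet? ((PySem.List.pyGet? matrix r).getD []) c).getD "*"
-- matrix[r][c] = "v" (indices are guard-checked nonnegative at every use site)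
def pvMark (matrix : List (List String)) (r c : Int) : List (List String) :=
  matrix.set r.toNat (((PySem.List.pyGet? matrix r).getD []).set c.toNat "v")
-- number of cells that are neither "*" nor "v" (the termination measure)
def pvFree (s : String) : Bool := !(s == "*" || s == "v")
def freeCount (matrix : List (List String)) : Nat :=
  (matrix.map (fun row => row.countP pvFree)).sum

-- the two measure lemmas the ports' termination proofs cite by name
theorem countP_set_v_lt (row : List String) (j : Nat) (hj : j < row.length)
    (h : pvFree row[j] = true) :
    (row.set j "v").countP pvFree < row.countP pvFree := by
  induction row generalizing j with
  | nil => simp at hj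
  | cons x xs ih =>
    cases j with
    | zero => simp_all [pvFree]
    | succ n =>
      simp only [List.set_cons_succ, List.countP_cons]
      have := ih n (by simpa using hj) (by simpa using h)
      omega

theorem freeCount_set_lt (matrix : List (List String)) (i : Nat) (row' : List String)
    (hi : i < matrix.length) (h : row'.countP pvFree < matrix[i].countP pvFree) :
    freeCount (matrix.set i row') < freeCount matrix := by
  induction matrix generalizing i with
  | nil => simp at hi
  | cons x xs ih =>
    cases i with
    | zero =>
      simp only [List.set_cons_zero, freeCount, List.map_cons, List.sum_cons]
      have hx : row'.countP pvFree < x.countP pvFree := by simpa using h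
      omega
    | succ n =>
      simp only [List.set_cons_succ, freeCount, List.map_cons, List.sum_cons] at *
      have := ih n (by simpa using hi) (by simpa using h)
      omega

theorem mark_lt (matrix : List (List String)) (r c : Int)
    (h1 : ¬(r < 0 ∨ c < 0 ∨ (matrix.length : Int) ≤ r ∨ (pvWidth matrix : Int) ≤ c))
    (h2 : ¬(pvCell matrix r c = "*" ∨ pvCell matrix r c = "v")) :
    freeCount (pvMark matrix r c) < freeCount matrix := by
  simp only [not_or, not_lt, not_le] at h1 h2
  obtain ⟨hr0, hc0, hrlen, -⟩ := h1
  have hrn : r.toNat < matrix.length := by omega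
  have hrow : PySem.List.pyGet? matrix r = some matrix[r.toNat] :=
    PySem.List.pyGet?_eq_some_getElem matrix hr0 hrlen
  by_cases hcn : c.toNat < (matrix[r.toNat]).length
  · have hclen : c < ((matrix[r.toNat]).length : Int) := by omega
    have hcell : PySem.List.pyGet? (matrix[r.toNat]) c = some ((matrix[r.toNat])[c.toNat]) :=
      PySem.List.pyGet?_eq_some_getElem (matrix[r.toNat]) hc0 hclen
    have hfree : pvFree ((matrix[r.toNat])[c.toNat]) = true := by
      have e1 := h2.1; have e2 := h2.2
      simp only [pvCell, hrow, Option.getD_some, hcell] at e1 e2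
      simp [pvFree, e1, e2]
    exact freeCount_set_lt matrix r.toNat _ hrn (by
      simpa [pvMark, hrow] using countP_set_v_lt (matrix[r.toNat]) c.toNat hcn hfree)
  · exfalso
    have hnone : PySem.List.pyGet? (matrix[r.toNat]) c = none := by
      rw [PySem.List.pyGet?_of_nonneg (matrix[r.toNat]) hc0]
      simp only [List.getElem?_eq_none_iff]
      omega
    exact h2.1 (by simp [pvCell, hrow, hnone])

-- ===== PORT A =====
-- literal transliteration of A's recursion; `fuel` is a pure totality guard
-- (fuel = freeCount matrix + 1 always suffices: every recursive call happens after a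
-- free cell was marked, see mark_lt / exploreAF_freeCount_le below)
def exploreAF : Nat → Int → Int → List (List String) → Int × List (List String)
  | 0, _, _, matrix => (0, matrix)
  | fuel + 1, r, c, matrix =>
    if r < 0 ∨ c < 0 ∨ (matrix.length : Int) ≤ r ∨ (pvWidth matrix : Int) ≤ c then
      (0, matrix)
    else if pvCell matrix r c = "*" ∨ pvCell matrix r c = "v" then
      (0, matrix)
    else
      let p1 := exploreAF fuel (r + 1) c (pvMark matrix r c)      -- down
      let p2 := exploreAF fuel r (c + 1) p1.2                     -- right
      let p3 := exploreAF fuel (r - 1) c p2.2                     -- up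
      let p4 := exploreAF fuel r (c - 1) p3.2                     -- left
      (1 + p1.1 + p2.1 + p3.1 + p4.1, p4.2)

def explore_area (row : Int) (col : Int) (matrix : List (List String)) : Int :=
  (exploreAF (freeCount matrix + 1) row col matrix).1

-- ===== PORT B =====
-- the while-loop of Source B: pop the top, skip out-of-bounds/blocked cells, else mark,
-- count and push the four neighbours (left,up,right,down order of Source B's extend;
-- head of the Lean list = top of the Python stack)
def goB (stack : List (Int × Int)) (matrix : List (List String)) (acc : Int) : Int :=
  match stack with
  | [] => acc
  | (r, c) :: rest =>
    if h1 : r < 0 ∨ c < 0 ∨ (matrix.length : Int) ≤ r ∨ (pvWidth matrix : Int) ≤ c then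
      goB rest matrix acc
    else if h2 : pvCell matrix r c = "*" ∨ pvCell matrix r c = "v" then
      goB rest matrix acc
    else
      goB ((r + 1, c) :: (r, c + 1) :: (r - 1, c) :: (r, c - 1) :: rest)
        (pvMark matrix r c) (acc + 1)
termination_by (freeCount matrix, stack.length)
decreasing_by
  · exact Prod.Lex.right _ (by simp)
  · exact Prod.Lex.right _ (by simp)
  · exact Prod.Lex.left _ _ (mark_lt matrix r c h1 h2)

def explore_area_alt (row : Int) (col : Int) (matrix : List (List String)) : Int :=
  if row < 0 ∨ col < 0 ∨ (matrix.length : Int) ≤ row ∨ (pvWidth matrix : Int) ≤ col then 0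
  else if pvCell matrix row col = "*" ∨ pvCell matrix row col = "v" then 0
  else goB [(row, col)] matrix 0

-- ===== PRECONDITION & SPEC =====
def Spec_explore_area (row : Int) (col : Int) (matrix : List (List String)) (out : Int) : Prop := out = explore_area_alt row col matrix
instance (row : Int) (col : Int) (matrix : List (List String)) (out : Int) : Decidable (Spec_explore_area row col matrix out) := by unfold Spec_explore_area; infer_instance

-- ===== CLAIM (what is proved, stated in full; the proofs are below) =====
def Claim_equal_explore_area : Prop := ∀ (row : Int) (col : Int) (matrix : List (List String)), Dom_explore_area row col matrix → Spec_explore_area row col matrix (explore_area row col matrix)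

-- ===== LEMMAS AND PROOFS =====

theorem goB_nil (matrix : List (List String)) (acc : Int) : goB [] matrix acc = acc := by
  rw [goB]

theorem goB_skip (r c : Int) (rest : List (Int × Int)) (matrix : List (List String)) (acc : Int)
    (h : (r < 0 ∨ c < 0 ∨ (matrix.length : Int) ≤ r ∨ (pvWidth matrix : Int) ≤ c) ∨
      (pvCell matrix r c = "*" ∨ pvCell matrix r c = "v")) :
    goB ((r, c) :: rest) matrix acc = goB rest matrix acc := by
  rw [goB]
  rcases h with h | h
  · rw [dif_pos h]
  · by_cases h1 : r < 0 ∨ c < 0 ∨ (matrix.length : Int) ≤ r ∨ (pvWidth matrix : Int) ≤ c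
    · rw [dif_pos h1]
    · rw [dif_neg h1, dif_pos h]

theorem goB_mark (r c : Int) (rest : List (Int × Int)) (matrix : List (List String)) (acc : Int)
    (h1 : ¬(r < 0 ∨ c < 0 ∨ (matrix.length : Int) ≤ r ∨ (pvWidth matrix : Int) ≤ c))
    (h2 : ¬(pvCell matrix r c = "*" ∨ pvCell matrix r c = "v")) :
    goB ((r, c) :: rest) matrix acc =
      goB ((r + 1, c) :: (r, c + 1) :: (r - 1, c) :: (r, c - 1) :: rest)
        (pvMark matrix r c) (acc + 1) := by
  rw [goB, dif_neg h1, dif_neg h2]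

-- fuel never creates free cells
theorem exploreAF_freeCount_le (fuel : Nat) :
    ∀ (r c : Int) (matrix : List (List String)),
      freeCount (exploreAF fuel r c matrix).2 ≤ freeCount matrix := by
  induction fuel with
  | zero => intro r c matrix; simp [exploreAF]
  | succ n ih =>
    intro r c matrix
    rw [exploreAF]
    split_ifs with h1 h2
    · simp
    · simp
    · simp only
      calc freeCount (exploreAF n r (c - 1) _).2
          ≤ freeCount (exploreAF n (r - 1) c _).2 := ih _ _ _
        _ ≤ freeCount (exploreAF n r (c + 1) _).2 := ih _ _ _
        _ ≤ freeCount (exploreAF n (r + 1) c (pvMark matrix r c)).2 := ih _ _ _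
        _ ≤ freeCount (pvMark matrix r c) := ih _ _ _
        _ ≤ freeCount matrix := le_of_lt (mark_lt matrix r c h1 h2)

-- the simulation: popping (r,c) off Source B's stack does exactly what A's recursive call does
theorem sim (fuel : Nat) :
    ∀ (matrix : List (List String)), freeCount matrix < fuel →
    ∀ (r c : Int) (rest : List (Int × Int)) (acc : Int),
      goB ((r, c) :: rest) matrix acc =
        goB rest (exploreAF fuel r c matrix).2 (acc + (exploreAF fuel r c matrix).1) := by
  induction fuel with
  | zero => intro matrix hm; omega
  | succ n ih =>
    intro matrix hm r c rest acc
    by_cases h1 : r < 0 ∨ c < 0 ∨ (matrix.length : Int) ≤ r ∨ (pvWidth matrix : Int) ≤ c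
    · rw [goB_skip _ _ _ _ _ (Or.inl h1), exploreAF, if_pos h1]
      norm_num
    by_cases h2 : pvCell matrix r c = "*" ∨ pvCell matrix r c = "v"
    · rw [goB_skip _ _ _ _ _ (Or.inr h2), exploreAF, if_neg h1, if_pos h2]
      norm_num
    · have hlt : freeCount (pvMark matrix r c) < freeCount matrix := mark_lt matrix r c h1 h2
      have f1 : freeCount (pvMark matrix r c) < n := by omega
      have f2 : freeCount (exploreAF n (r + 1) c (pvMark matrix r c)).2 < n :=
        lt_of_le_of_lt (exploreAF_freeCount_le n _ _ _) f1
      have f3 : freeCount (exploreAF n r (c + 1) (exploreAF n (r + 1) c (pvMark matrix r c)).2).2 < n :=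
        lt_of_le_of_lt (exploreAF_freeCount_le n _ _ _) f2
      have f4 : freeCount (exploreAF n (r - 1) c (exploreAF n r (c + 1) (exploreAF n (r + 1) c (pvMark matrix r c)).2).2).2 < n :=
        lt_of_le_of_lt (exploreAF_freeCount_le n _ _ _) f3
      rw [goB_mark _ _ _ _ _ h1 h2]
      rw [ih _ f1, ih _ f2, ih _ f3, ih _ f4]
      conv_rhs => rw [exploreAF, if_neg h1, if_neg h2]
      simp only
      congr 1
      ring

-- ===== VERDICT (by name: the statement is the Claim_ definition above) =====
theorem explore_area_spec : Claim_equal_explore_area := by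
  intro row col matrix _
  unfold Spec_explore_area explore_area explore_area_alt
  by_cases h1 : row < 0 ∨ col < 0 ∨ (matrix.length : Int) ≤ row ∨ (pvWidth matrix : Int) ≤ col
  · rw [if_pos h1, exploreAF, if_pos h1]
  rw [if_neg h1]
  by_cases h2 : pvCell matrix row col = "*" ∨ pvCell matrix row col = "v"
  · rw [if_pos h2, exploreAF, if_neg h1, if_pos h2]
  · rw [if_neg h2]
    rw [sim (freeCount matrix + 1) matrix (by omega) row col [] 0, goB_nil]
    ring
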